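-- pv_equiv track=rewrite | github.com/alxwen711/contestSubmissionArchive | codeforces/live contests/2023-3/e153/d.py | compute
-- ===== SOURCE A (Python) =====
-- def compute(n,ar):
--     z,o = 0,0 #01,10
--     zp,op = 0,0
--     for i in range(n):
--         if ar[-i-1] == 1:
--             o += zp
--             op += 1
--         else:
--             z += op
--             zp += 1
--     return z-o
-- ===== SOURCE B (Python) =====
-- def compute(n, ar):
--     # Stage 1: materialise the window A visits (reversed suffix), stage 2:
--     # collect the positions of the ones, stage 3: closed-form combination.
--     w = ar[::-1][:n] if n > 0 else []
--     ones = [i for i, x in enumerate(w) if x == 1]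
--     O, S = len(ones), sum(ones)
--     return O * (len(w) - O) - 2 * S + O * (O - 1)
-- ===== Notes on version B (the rewrite author's own statement) =====
-- stated objective: alternative
-- what changed: A runs a state machine over indices (z,o,zp,op with o += zeros-so-far / z += ones-so-far per step); B instead materialises the reversed window ar[::-1][:n], lists the positions of the ones with one comprehension, and returns the closed form O*(len(w)-O) - 2*S + O*(O-1) from the aggregates O = #ones and S = sum of their positions, which equals z-o by the identities z+o = O*Z and 2*o = 2*S - O*(O-1).
import Mathlib
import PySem

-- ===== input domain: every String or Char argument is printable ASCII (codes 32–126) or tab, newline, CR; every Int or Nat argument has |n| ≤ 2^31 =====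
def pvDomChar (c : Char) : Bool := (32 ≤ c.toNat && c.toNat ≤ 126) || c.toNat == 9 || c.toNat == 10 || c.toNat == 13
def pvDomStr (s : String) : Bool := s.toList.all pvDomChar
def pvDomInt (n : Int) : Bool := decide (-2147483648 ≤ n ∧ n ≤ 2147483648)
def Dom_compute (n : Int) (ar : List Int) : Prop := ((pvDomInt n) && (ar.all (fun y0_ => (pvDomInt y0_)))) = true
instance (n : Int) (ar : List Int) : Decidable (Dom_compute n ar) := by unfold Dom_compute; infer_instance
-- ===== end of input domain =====

-- B replaces A's incremental cross-pair state machine by three stages: build the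
-- reversed window A visits, list the positions of the ones, and combine the
-- aggregates by the closed form O*(|w|-O) - 2*S + O*(O-1); same cost (alternative).

-- ===== PORT A =====
-- the loop body of A: state (z, o, zp, op)
def computeStepA (ar : List Int) (st : Int × Int × Int × Int) (i : Int) :
    Int × Int × Int × Int :=
  if (PySem.List.pyGet? ar (-i - 1)).getD 0 = 1 then
    (st.1, st.2.1 + st.2.2.1, st.2.2.1, st.2.2.2 + 1)
  else
    (st.1 + st.2.2.2, st.2.1, st.2.2.1 + 1, st.2.2.2)

def compute (n : Int) (ar : List Int) : Int :=
  let st := (PySem.List.pyRange 0 n 1).foldl (computeStepA ar) (0, 0, 0, 0)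
  st.1 - st.2.1

-- ===== PORT B =====
def compute_alt (n : Int) (ar : List Int) : Int :=
  let w := if 0 < n then
      PySem.List.slice ((PySem.List.slice? ar none none (-1)).getD []) none (some n)
    else []
  let ones := ((PySem.List.enumerate w 0).filter (fun p => p.2 == 1)).map (fun p => p.1)
  let O : Int := (ones.length : Int)
  let S : Int := ones.sum
  O * ((w.length : Int) - O) - 2 * S + O * (O - 1)

-- ===== PRECONDITION & SPEC =====
-- Pre_ excludes exactly the inputs on which Python A raises IndexError:
-- n > len(ar), where some access ar[-i-1] is out of range.
def Pre_compute (n : Int) (ar : List Int) : Prop := n ≤ (ar.length : Int)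
instance (n : Int) (ar : List Int) : Decidable (Pre_compute n ar) := by
  unfold Pre_compute; infer_instance

def pvWitness_compute : Int × List Int := (3, [1, 0, 1])

def Spec_compute (n : Int) (ar : List Int) (out : Int) : Prop := out = compute_alt n ar
instance (n : Int) (ar : List Int) (out : Int) : Decidable (Spec_compute n ar out) := by unfold Spec_compute; infer_instance

-- ===== CLAIM (what is proved, stated in full; the proofs are below) =====
def Claim_equal_compute : Prop := ∀ (n : Int) (ar : List Int), Dom_compute n ar → Pre_compute n ar → Spec_compute n ar (compute n ar)

-- ===== LEMMAS AND PROOFS =====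

-- A's loop body as a function of the visited VALUE (its state never uses i).
def stepAval (st : Int × Int × Int × Int) (x : Int) : Int × Int × Int × Int :=
  if x = 1 then
    (st.1, st.2.1 + st.2.2.1, st.2.2.1, st.2.2.2 + 1)
  else
    (st.1 + st.2.2.2, st.2.1, st.2.2.1 + 1, st.2.2.2)

-- positions (starting at i) of the ones in l
def onesOf : List Int → Int → List Int
  | [], _ => []
  | x :: l, i => if x = 1 then i :: onesOf l (i + 1) else onesOf l (i + 1)

-- B's enumerate/filter/map pipeline computes onesOf
theorem ones_pipeline (l : List Int) (i : Int) :
    ((PySem.List.enumerate l i).filter (fun p => p.2 == 1)).map (fun p => p.1) =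
      onesOf l i := by
  induction l generalizing i with
  | nil => simp [PySem.List.enumerate_nil, onesOf]
  | cons x l ih =>
    rw [PySem.List.enumerate_cons]
    by_cases hx : x = 1 <;>
      simp [onesOf, hx, ih]

-- bridge: A's index loop over range(n) is a value fold over the window
-- w = ar[::-1][:n] (for 0 ≤ a ≤ n ≤ len ar, starting at step a)
theorem bridgeA (ar : List Int) (n : Int) (hn : n ≤ (ar.length : Int)) :
    ∀ (k : Nat) (a : Int) (st : Int × Int × Int × Int), (n - a).toNat = k → 0 ≤ a →
      (PySem.List.pyRange a n 1).foldl (computeStepA ar) st =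
        ((ar.reverse.take n.toNat).drop a.toNat).foldl stepAval st := by
  intro k
  induction k with
  | zero =>
    intro a st hk ha
    have hna : n ≤ a := by omega
    rw [PySem.List.pyRange_one_eq_nil hna]
    have hle : (ar.reverse.take n.toNat).length ≤ a.toNat := by
      simp [List.length_take]; omega
    rw [List.drop_eq_nil_of_le hle]
    simp
  | succ k ih =>
    intro a st hk ha
    have han : a < n := by omega
    have hlt : a.toNat < (ar.reverse.take n.toNat).length := by
      simp [List.length_take]; omega
    rw [PySem.List.pyRange_one_cons han,
        List.drop_eq_getElem_cons hlt]
    simp only [List.foldl_cons]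
    have hval : (PySem.List.pyGet? ar (-a - 1)).getD 0 =
        (ar.reverse.take n.toNat)[a.toNat] := by
      have h1 : -a - 1 = -((a.toNat + 1 : Nat) : Int) := by push_cast; omega
      have h2 : (a.toNat + 1) ≤ ar.length := by omega
      rw [h1, PySem.List.pyGet?_neg_natCast ar (a.toNat + 1) (by omega) h2]
      have h3 : ar.length - (a.toNat + 1) < ar.length := by omega
      rw [List.getElem?_eq_getElem h3]
      rw [List.getElem_take, List.getElem_reverse]
      simp [Option.getD]
      congr 1
      omega
    have hst : computeStepA ar st a = stepAval st (ar.reverse.take n.toNat)[a.toNat] := by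
      rw [computeStepA, stepAval, hval]
    rw [hst]
    have hdrop : (a + 1).toNat = a.toNat + 1 := by omega
    rw [← hdrop] at *
    exact ih (a + 1) _ (by omega) (by omega)

-- main invariant: the value fold's z - o equals the closed form in the
-- aggregates of the remaining ones-positions
theorem foldVal_inv :
    ∀ (l : List Int) (i z o zp op O Z S : Int),
      op = O → zp = Z → O + Z = i → z + o = O * Z → 2 * o = 2 * S - O * (O - 1) →
      (l.foldl stepAval (z, o, zp, op)).1 - (l.foldl stepAval (z, o, zp, op)).2.1 =
        (O + ((onesOf l i).length : Int)) * ((i + (l.length : Int)) - (O + ((onesOf l i).length : Int)))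
          - 2 * (S + (onesOf l i).sum)
          + (O + ((onesOf l i).length : Int)) * ((O + ((onesOf l i).length : Int)) - 1) := by
  intro l
  induction l with
  | nil =>
    intro i z o zp op O Z S hop hzp hOZ hzo h2o
    simp only [List.foldl_nil, onesOf, List.length_nil, List.sum_nil]
    subst hOZ
    linear_combination hzo - h2o
  | cons x l ih =>
    intro i z o zp op O Z S hop hzp hOZ hzo h2o
    simp only [List.foldl_cons, stepAval, onesOf]
    by_cases hx : x = 1
    · rw [if_pos hx, if_pos hx]
      have := ih (i + 1) z (o + zp) zp (op + 1) (O + 1) Z (S + i)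
        (by omega) hzp (by omega) (by nlinarith [hzo]) (by nlinarith [h2o])
      simp only [List.length_cons, List.sum_cons]
      push_cast at this ⊢
      linear_combination this
    · rw [if_neg hx, if_neg hx]
      have := ih (i + 1) (z + op) o (zp + 1) op O (Z + 1) S
        hop (by omega) (by omega) (by nlinarith [hzo]) h2o
      simp only [List.length_cons]
      push_cast at this ⊢
      linear_combination this

-- ===== VERDICT (by name: the statement is the Claim_ definition above) =====
theorem compute_spec : Claim_equal_compute := by
  intro n ar _ hpre
  unfold Spec_compute compute compute_alt
  by_cases hn : 0 < n
  · have hw : (if 0 < n then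
        PySem.List.slice ((PySem.List.slice? ar none none (-1)).getD []) none (some n)
      else []) = ar.reverse.take n.toNat := by
      rw [if_pos hn, PySem.List.slice?_none_none_neg_one]
      simp [PySem.List.slice_to ar.reverse (le_of_lt hn)]
    simp only [hw, ones_pipeline]
    rw [bridgeA ar n hpre (n - 0).toNat 0 (0,0,0,0) rfl le_rfl]
    simp only [Int.toNat_zero, List.drop_zero]
    have := foldVal_inv (ar.reverse.take n.toNat) 0 0 0 0 0 0 0 0 rfl rfl
      (by ring) (by ring) (by ring)
    push_cast at this ⊢
    linear_combination this
  · have hnil : PySem.List.pyRange 0 n 1 = [] :=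
      PySem.List.pyRange_one_eq_nil (by omega)
    rw [hnil, if_neg hn]
    simp [PySem.List.enumerate_nil]
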